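-- pv_equiv track=rewrite | github.com/RAIRLab/bloxorz | YY-tiles-tiny-board.py | has_full_yellow_line
-- ===== SOURCE A (Python) =====
-- def has_full_yellow_line(grid):
--     """Check if there's a full row or column of only yellow tiles."""
--     rows, cols = len(grid), len(grid[0])
--
--     # Check rows
--     for r in range(rows):
--         if all(grid[r][c] == "YY" for c in range(cols)):
--             return True
--
--     # Check columns
--     for c in range(cols):
--         if all(grid[r][c] == "YY" for r in range(rows)):
--             return True
--
--     return False
-- ===== SOURCE B (Python) =====
-- def has_full_yellow_line(grid):
--     """Check if there's a full row or column of only yellow tiles."""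
--     rows, cols = len(grid), len(grid[0])
--     row_counts = [0] * rows
--     col_counts = [0] * cols
--     for r in range(rows):
--         for c in range(cols):
--             if grid[r][c] == "YY":
--                 row_counts[r] += 1
--                 col_counts[c] += 1
--     return any(x == cols for x in row_counts) or any(x == rows for x in col_counts)
-- ===== Notes on version B (the rewrite author's own statement) =====
-- stated objective: alternative
-- what changed: Replaced per-line all() scans with early return by a single pass over all cells that builds row/column tally tables, then checks the tallies against the line lengths.
-- outside the precondition, e.g. on has_full_yellow_line([['YY', 'YY'], ['XX']]): A returns True, B raises IndexError
import Mathlib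
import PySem

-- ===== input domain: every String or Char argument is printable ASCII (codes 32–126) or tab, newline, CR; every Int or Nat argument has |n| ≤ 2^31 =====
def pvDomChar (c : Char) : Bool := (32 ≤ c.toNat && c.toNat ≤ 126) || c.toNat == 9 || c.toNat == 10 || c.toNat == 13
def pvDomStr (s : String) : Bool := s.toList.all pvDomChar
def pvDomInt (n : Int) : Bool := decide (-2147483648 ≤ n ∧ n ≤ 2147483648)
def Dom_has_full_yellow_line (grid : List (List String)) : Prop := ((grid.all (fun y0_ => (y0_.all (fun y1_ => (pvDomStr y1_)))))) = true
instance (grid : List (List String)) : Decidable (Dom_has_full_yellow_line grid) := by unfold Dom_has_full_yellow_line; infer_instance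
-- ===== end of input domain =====

-- B replaces A's per-line all() scans (with early return) by one pass over all cells that
-- builds row/column tally tables and then compares each tally with the line length (objective: alternative).

-- ===== PORT A =====
def has_full_yellow_line (grid : List (List String)) : Bool :=
  let rows : Int := grid.length
  let cols : Int := (PySem.List.pyGetD grid 0 ([] : List String)).length
  if (PySem.List.pyRange 0 rows 1).any (fun r =>
       (PySem.List.pyRange 0 cols 1).all (fun c =>
         PySem.List.pyGetD (PySem.List.pyGetD grid r ([] : List String)) c "" == "YY")) then
    true
  else if (PySem.List.pyRange 0 cols 1).any (fun c =>
       (PySem.List.pyRange 0 rows 1).all (fun r =>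
         PySem.List.pyGetD (PySem.List.pyGetD grid r ([] : List String)) c "" == "YY")) then
    true
  else
    false

-- ===== PORT B =====
def has_full_yellow_line_alt (grid : List (List String)) : Bool :=
  let rows : Int := grid.length
  let cols : Int := (PySem.List.pyGetD grid 0 ([] : List String)).length
  let counts :=
    (PySem.List.pyRange 0 rows 1).foldl (fun st r =>
      (PySem.List.pyRange 0 cols 1).foldl (fun st c =>
        if PySem.List.pyGetD (PySem.List.pyGetD grid r ([] : List String)) c "" == "YY" then
          (st.1.modify r.toNat (· + 1), st.2.modify c.toNat (· + 1))
        else st) st)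
      (List.replicate rows.toNat (0 : Int), List.replicate cols.toNat (0 : Int))
  counts.1.any (fun x => x == cols) || counts.2.any (fun x => x == rows)

-- ===== PRECONDITION & SPEC =====
-- Pre_ excludes the empty grid (len(grid[0]) raises IndexError in both A and B) and ragged grids
-- where some row is shorter than the first row: on those B always raises IndexError, while A
-- raises too unless an earlier full-yellow line makes it return before touching the short row.
def Pre_has_full_yellow_line (grid : List (List String)) : Prop :=
  grid ≠ [] ∧ ∀ row ∈ grid, (grid.headD []).length ≤ row.length
instance (grid : List (List String)) : Decidable (Pre_has_full_yellow_line grid) := by unfold Pre_has_full_yellow_line; infer_instance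
def pvWitness_has_full_yellow_line : List (List String) := [["YY", "XX"], ["YY", "YY"]]

def Spec_has_full_yellow_line (grid : List (List String)) (out : Bool) : Prop := out = has_full_yellow_line_alt grid
instance (grid : List (List String)) (out : Bool) : Decidable (Spec_has_full_yellow_line grid out) := by unfold Spec_has_full_yellow_line; infer_instance

-- ===== CLAIM (what is proved, stated in full; the proofs are below) =====
def Claim_equal_has_full_yellow_line : Prop := ∀ (grid : List (List String)), Dom_has_full_yellow_line grid → Pre_has_full_yellow_line grid → Spec_has_full_yellow_line grid (has_full_yellow_line grid)

-- ===== LEMMAS AND PROOFS =====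

-- the cell test grid[r][c] == "YY" as both totalized ports compute it
def pvYel (grid : List (List String)) (r c : Nat) : Bool := ((grid.getD r []).getD c "") == "YY"

theorem pv_modify_modify (st : List Int) (i : Nat) (f g : Int → Int) :
    (st.modify i f).modify i g = st.modify i (fun x => g (f x)) := by
  apply List.ext_getElem (by simp)
  intro j h1 h2
  by_cases h : i = j
  · simp [h]
  · simp [h]

theorem pv_modify_id (st : List Int) (i : Nat) : st.modify i (fun x => x) = st := by
  apply List.ext_getElem (by simp)
  intro j h1 h2
  by_cases h : i = j
  · simp [h]
  · simp [h]

-- a loop that conditionally increments one FIXED slot adds the count of hits to that slot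
theorem pv_fixmod (p : Nat → Bool) (i : Nat) :
    ∀ (l : List Nat) (st : List Int),
      l.foldl (fun s c => if p c then s.modify i (· + 1) else s) st
        = st.modify i (· + (l.countP p : Int)) := by
  intro l
  induction l with
  | nil => intro st; simp [pv_modify_id]
  | cons a l ih =>
    intro st
    by_cases h : p a
    · simp only [List.foldl_cons, h, if_true, ih, pv_modify_modify, List.countP_cons]
      congr 1
      funext x
      push_cast
      ring
    · simp [List.foldl_cons, h, ih]

theorem pv_modify_append_len (l : List Int) (x : Int) (l' : List Int) (f : Int → Int) (i : Nat)
    (hi : i = l.length) : (l ++ x :: l').modify i f = l ++ f x :: l' := by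
  subst hi
  induction l with
  | nil => simp
  | cons a l ih => simp [ih]

-- visiting slots 0,…,t-1 once each, adding cnt r to slot r, fills the first t slots of the zero table
theorem pv_rowsfold (cnt : Nat → Int) :
    ∀ (t N : Nat), t ≤ N →
      (List.range t).foldl (fun s r => s.modify r (· + cnt r)) (List.replicate N (0 : Int))
        = (List.range t).map (fun r => 0 + cnt r) ++ List.replicate (N - t) 0 := by
  intro t
  induction t with
  | zero => intro N _; simp
  | succ t ih =>
    intro N ht
    rw [List.range_succ, List.foldl_append, ih N (by omega)]
    have hrep : List.replicate (N - t) (0 : Int) = 0 :: List.replicate (N - (t + 1)) 0 := by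
      have : N - t = (N - (t + 1)) + 1 := by omega
      rw [this, List.replicate_succ]
    rw [hrep]
    simp only [List.foldl_cons, List.foldl_nil]
    rw [pv_modify_append_len ((List.range t).map (fun r => 0 + cnt r)) 0 _ _ t (by simp)]
    simp

-- one sweep over all slots 0,…,t-1, conditionally incrementing the slot being visited
theorem pv_colsweep (p : Nat → Bool) :
    ∀ (t : Nat) (st : List Int),
      (List.range t).foldl (fun s c => if p c then s.modify c (· + 1) else s) st
        = st.mapIdx (fun j x => if j < t ∧ p j then x + 1 else x) := by
  intro t
  induction t with
  | zero =>
    intro st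
    simp
    apply List.ext_getElem (by simp)
    intro j h1 h2
    simp [List.getElem_mapIdx]
  | succ t ih =>
    intro st
    rw [List.range_succ, List.foldl_append, ih]
    simp only [List.foldl_cons, List.foldl_nil]
    by_cases h : p t
    · rw [if_pos h]
      apply List.ext_getElem (by simp)
      intro j h1 h2
      simp only [List.getElem_modify, List.getElem_mapIdx]
      by_cases hj : t = j
      · subst hj; simp [h]
      · by_cases hjt : j < t
        · simp [hjt, hj, show j < t + 1 by omega]
        · simp [hjt, hj, show ¬ (j < t + 1) by omega]
    · rw [if_neg h]
      apply List.ext_getElem (by simp)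
      intro j h1 h2
      simp only [List.getElem_mapIdx]
      by_cases hjt : j < t
      · simp [hjt, show j < t + 1 by omega]
      · by_cases hj : j = t
        · subst hj; simp [h]
        · simp [hjt, show ¬ (j < t + 1) by omega]

-- accumulating the per-row sweeps: each slot j ends up with the number of rows hitting it
theorem pv_colacc (q : Nat → Nat → Bool) (m : Nat) :
    ∀ (l : List Nat) (st : List Int), st.length = m →
      l.foldl (fun s r => s.mapIdx (fun j x => if j < m ∧ q r j then x + 1 else x)) st
        = st.mapIdx (fun j x => x + ((l.countP (fun r => q r j)) : Int)) := by
  intro l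
  induction l with
  | nil =>
    intro st _
    apply List.ext_getElem (by simp)
    intro j h1 h2
    simp [List.getElem_mapIdx]
  | cons a l ih =>
    intro st hst
    rw [List.foldl_cons, ih _ (by simp [hst])]
    apply List.ext_getElem (by simp)
    intro j h1 h2
    have hjm : j < m := by simpa [hst] using h2
    simp only [List.getElem_mapIdx, List.countP_cons, hjm, true_and]
    by_cases h : q a j
    · simp [h]
      ring
    · simp [h]

theorem pv_mapIdx_replicate_zero (m : Nat) (f : Nat → Int → Int) :
    (List.replicate m (0 : Int)).mapIdx f = (List.range m).map (fun j => f j 0) := by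
  apply List.ext_getElem (by simp)
  intro j h1 h2
  simp [List.getElem_mapIdx]

-- a tally equals the line length exactly when every cell of the line passes the test
theorem pv_cnt_eq_len (l : List Nat) (p : Nat → Bool) :
    (((l.countP p : Nat) : Int) == ((l.length : Nat) : Int)) = l.all p := by
  rw [Bool.eq_iff_iff]
  simp [List.all_eq_true, ← List.countP_eq_length]

-- characterization of port A
theorem pv_aChar (g : List (List String)) :
    has_full_yellow_line g
      = (((List.range g.length).any fun r => (List.range (g.getD 0 []).length).all fun c => pvYel g r c)
         || ((List.range (g.getD 0 []).length).any fun c => (List.range g.length).all fun r => pvYel g r c)) := by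
  unfold has_full_yellow_line pvYel
  simp only [PySem.List.pyRange_one, sub_zero, Int.toNat_natCast, List.any_map, List.all_map,
    zero_add, PySem.List.pyGetD_zero]
  split_ifs with h1 h2 <;> simp_all

-- characterization of port B
theorem pv_bChar (g : List (List String)) :
    has_full_yellow_line_alt g
      = (((List.range g.length).any fun r =>
            (((List.range (g.getD 0 []).length).countP (pvYel g r) : Nat) : Int) == ((g.getD 0 []).length : Int))
         || ((List.range (g.getD 0 []).length).any fun c =>
            (((List.range g.length).countP (fun r => pvYel g r c) : Nat) : Int) == (g.length : Int))) := by
  unfold has_full_yellow_line_alt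
  simp only [PySem.List.pyRange_one, sub_zero, Int.toNat_natCast, List.foldl_map,
    zero_add, PySem.List.pyGetD_natCast, PySem.List.pyGetD_zero]
  -- rewrite the cell update as a componentwise pair update, then split the two tables
  have hsplit : ∀ (r : Nat) (st : List Int × List Int),
      (List.range (g.getD 0 []).length).foldl (fun st c =>
          if (g.getD r []).getD c "" == "YY" then
            (st.1.modify r (· + 1), st.2.modify c (· + 1))
          else st) st
        = ((List.range (g.getD 0 []).length).foldl
              (fun s c => if pvYel g r c then s.modify r (· + 1) else s) st.1,
           (List.range (g.getD 0 []).length).foldl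
              (fun s c => if pvYel g r c then s.modify c (· + 1) else s) st.2) := by
    intro r st
    obtain ⟨s1, s2⟩ := st
    rw [show (fun (st : List Int × List Int) (c : Nat) =>
          if (g.getD r []).getD c "" == "YY" then
            (st.1.modify r (· + 1), st.2.modify c (· + 1))
          else st)
        = (fun st c =>
            ((if pvYel g r c then st.1.modify r (· + 1) else st.1),
             (if pvYel g r c then st.2.modify c (· + 1) else st.2))) from by
        funext st c; unfold pvYel; split_ifs <;> rfl]
    exact PySem.List.foldl_prod_mk
      (fun s c => if pvYel g r c then s.modify r (· + 1) else s)
      (fun s c => if pvYel g r c then s.modify c (· + 1) else s)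
      (List.range (g.getD 0 []).length) s1 s2
  rw [show (fun (st : List Int × List Int) (r : Nat) =>
        (List.range (g.getD 0 []).length).foldl (fun st c =>
            if (g.getD r []).getD c "" == "YY" then
              (st.1.modify r (· + 1), st.2.modify c (· + 1))
            else st) st)
      = (fun st r =>
          ((List.range (g.getD 0 []).length).foldl
              (fun s c => if pvYel g r c then s.modify r (· + 1) else s) st.1,
           (List.range (g.getD 0 []).length).foldl
              (fun s c => if pvYel g r c then s.modify c (· + 1) else s) st.2)) from by
      funext st r; exact hsplit r st]
  rw [PySem.List.foldl_prod_mk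
        (fun (s : List Int) (r : Nat) =>
          (List.range (g.getD 0 []).length).foldl
            (fun s c => if pvYel g r c then s.modify r (· + 1) else s) s)
        (fun (s : List Int) (r : Nat) =>
          (List.range (g.getD 0 []).length).foldl
            (fun s c => if pvYel g r c then s.modify c (· + 1) else s) s)
        (List.range g.length) (List.replicate g.length 0)
        (List.replicate (g.getD 0 []).length 0)]
  -- row tallies
  have hrow :
      (List.range g.length).foldl (fun s r =>
          (List.range (g.getD 0 []).length).foldl
            (fun s c => if pvYel g r c then s.modify r (· + 1) else s) s)
        (List.replicate g.length (0 : Int))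
      = (List.range g.length).map
          (fun r => 0 + ((List.range (g.getD 0 []).length).countP (pvYel g r) : Int)) := by
    have : (fun (s : List Int) (r : Nat) =>
          (List.range (g.getD 0 []).length).foldl
            (fun s c => if pvYel g r c then s.modify r (· + 1) else s) s)
        = (fun s r => s.modify r (· + ((List.range (g.getD 0 []).length).countP (pvYel g r) : Int))) := by
      funext s r; exact pv_fixmod (pvYel g r) r _ s
    rw [this, pv_rowsfold _ g.length g.length le_rfl]
    simp
  -- column tallies
  have hcol :
      (List.range g.length).foldl (fun s r =>
          (List.range (g.getD 0 []).length).foldl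
            (fun s c => if pvYel g r c then s.modify c (· + 1) else s) s)
        (List.replicate (g.getD 0 []).length (0 : Int))
      = (List.range (g.getD 0 []).length).map
          (fun c => 0 + ((List.range g.length).countP (fun r => pvYel g r c) : Int)) := by
    have : (fun (s : List Int) (r : Nat) =>
          (List.range (g.getD 0 []).length).foldl
            (fun s c => if pvYel g r c then s.modify c (· + 1) else s) s)
        = (fun s r => s.mapIdx (fun j x => if j < (g.getD 0 []).length ∧ pvYel g r j then x + 1 else x)) := by
      funext s r; exact pv_colsweep (pvYel g r) _ s
    rw [this, pv_colacc (pvYel g) _ _ _ (by simp), pv_mapIdx_replicate_zero]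
  rw [hrow, hcol]
  simp [List.any_map, Function.comp_def]

-- ===== VERDICT (by name: the statement is the Claim_ definition above) =====
theorem has_full_yellow_line_spec : Claim_equal_has_full_yellow_line := by
  intro grid _ _
  unfold Spec_has_full_yellow_line
  rw [pv_aChar, pv_bChar]
  congr 1
  · refine List.any_congr rfl (fun r => ?_)
    rw [show ((grid.getD 0 []).length : Int) = ((List.range (grid.getD 0 []).length).length : Int) by simp,
      pv_cnt_eq_len]
  · refine List.any_congr rfl (fun c => ?_)
    rw [show (grid.length : Int) = ((List.range grid.length).length : Int) by simp,
      pv_cnt_eq_len]
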